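-- pv_equiv track=rewrite | github.com/Netocool2006/Motor-Fusion | core/domain_detector.py | _score_domains
-- ===== SOURCE A (Python) =====
-- def _score_domains(keywords: list, domains: dict) -> dict:
--     """
--     Calcula score de coincidencia entre keywords del texto y
--     keywords de cada dominio.
--
--     Score = numero de keywords del texto que aparecen en las keywords del dominio.
--     """
--     text_kw_set = set(keywords)
--     scores = {}
--
--     for domain_name, domain_data in domains.items():
--         domain_keywords = set(domain_data.get("keywords", []))
--         # Tambien incluir el nombre del dominio y sus variaciones
--         domain_keywords.add(domain_name)
--         domain_keywords.add(domain_name.replace("_", ""))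
--         domain_keywords.add(domain_name.replace("_", " "))
--
--         # Contar keywords en comun
--         common = text_kw_set & domain_keywords
--         if common:
--             scores[domain_name] = len(common)
--
--     return scores
-- ===== SOURCE B (Python) =====
-- def _score_domains(keywords: list, domains: dict) -> dict:
--     # Inverted index: keyword/name-variant -> set of domain names that carry it.
--     index = {}
--     for domain_name, domain_data in domains.items():
--         variants = list(domain_data.get("keywords", [])) + [
--             domain_name,
--             domain_name.replace("_", ""),
--             domain_name.replace("_", " "),
--         ]
--         for kw in variants:
--             index.setdefault(kw, set()).add(domain_name)
--
--     # Scatter: each distinct text keyword votes once for every domain holding it.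
--     counts = {}
--     for kw in set(keywords):
--         for d in index.get(kw, ()):
--             counts[d] = counts.get(d, 0) + 1
--
--     # Emit positive scores in the domains' own order.
--     return {d: counts[d] for d in domains if d in counts}
-- ===== Notes on version B (the rewrite author's own statement) =====
-- stated objective: alternative
-- what changed: Replaces the per-domain set-intersection scan with an inverted index keyword->set(domains) built once, a scatter pass over the distinct text keywords that increments per-domain counts, and a final pass over domains emitting positive counts.
import Mathlib
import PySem

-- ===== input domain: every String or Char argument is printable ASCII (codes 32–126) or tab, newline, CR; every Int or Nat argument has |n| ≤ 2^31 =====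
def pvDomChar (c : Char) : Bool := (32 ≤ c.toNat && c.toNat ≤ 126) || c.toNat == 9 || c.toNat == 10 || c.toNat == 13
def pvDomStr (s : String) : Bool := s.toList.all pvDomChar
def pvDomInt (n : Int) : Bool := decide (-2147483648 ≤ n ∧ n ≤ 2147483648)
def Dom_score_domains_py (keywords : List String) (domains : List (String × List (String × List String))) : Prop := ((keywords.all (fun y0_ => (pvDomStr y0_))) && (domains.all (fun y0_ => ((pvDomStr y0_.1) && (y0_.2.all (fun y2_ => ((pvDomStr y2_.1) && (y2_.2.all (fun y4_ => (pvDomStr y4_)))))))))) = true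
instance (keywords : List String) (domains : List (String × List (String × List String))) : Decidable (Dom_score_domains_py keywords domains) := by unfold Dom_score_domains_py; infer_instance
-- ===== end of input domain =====

-- B replaces A's per-domain set-intersection with an inverted index (keyword -> set of
-- domain names) plus a scatter/count pass over the distinct text keywords; same result.


-- ===== PORT A =====
def score_domains_py (keywords : List String) (domains : List (String × List (String × List String))) : List (String × Int) :=
  let text_kw_set : PySem.Set String := PySem.Set.ofList keywords
  let scores : PySem.Dict String Int :=
    domains.foldl (fun scores p =>
      let domain_name := p.1
      let domain_keywords : PySem.Set String :=
        PySem.Set.ofList ((PySem.Dict.mk p.2).getD "keywords" [])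
      let domain_keywords := PySem.Set.add domain_keywords domain_name
      let domain_keywords := PySem.Set.add domain_keywords (PySem.Str.replace domain_name "_" "")
      let domain_keywords := PySem.Set.add domain_keywords (PySem.Str.replace domain_name "_" " ")
      let common := PySem.Set.inter text_kw_set domain_keywords
      if common ≠ [] then scores.insert domain_name (PySem.Set.len common) else scores)
      PySem.Dict.empty
  scores.items

-- ===== PORT B =====
-- the `variants` list B builds for one domain entry
def sdVariants (p : String × List (String × List String)) : List String :=
  (PySem.Dict.mk p.2).getD "keywords" [] ++
    [p.1, PySem.Str.replace p.1 "_" "", PySem.Str.replace p.1 "_" " "]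

def score_domains_py_alt (keywords : List String) (domains : List (String × List (String × List String))) : List (String × Int) :=
  -- index.setdefault(kw, set()).add(name) ≡ index[kw] = (index.get(kw, set())).add(name): Dict.modify
  let index : PySem.Dict String (PySem.Set String) :=
    domains.foldl (fun idx p =>
      (sdVariants p).foldl (fun idx kw =>
        idx.modify kw [] (fun s => PySem.Set.add s p.1)) idx)
      PySem.Dict.empty
  let counts : PySem.Dict String Int :=
    (PySem.Set.ofList keywords).foldl (fun c kw =>
      (index.getD kw []).foldl (fun c d => c.modify d 0 (· + 1)) c)
      PySem.Dict.empty
  -- counts[d] under the `d in counts` guard: getD is exact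
  domains.foldl (fun out p =>
    if counts.contains p.1 then out ++ [(p.1, counts.getD p.1 0)] else out) []

-- ===== PRECONDITION & SPEC =====
-- Pre_ only excludes association lists with duplicate domain names, which cannot arise from
-- the Python `domains` dict argument (a dict's keys are unique), so no Python-reachable input is lost.
def Pre_score_domains_py (keywords : List String) (domains : List (String × List (String × List String))) : Prop :=
  (domains.map Prod.fst).Nodup
instance (keywords : List String) (domains : List (String × List (String × List String))) : Decidable (Pre_score_domains_py keywords domains) := by unfold Pre_score_domains_py; infer_instance
def pvWitness_score_domains_py : List String × (List (String × List (String × List String))) :=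
  (["ai", "data"], [("machine_learning", [("keywords", ["ai", "model"])]), ("web", [])])

def Spec_score_domains_py (keywords : List String) (domains : List (String × List (String × List String))) (out : List (String × Int)) : Prop := out = score_domains_py_alt keywords domains
instance (keywords : List String) (domains : List (String × List (String × List String))) (out : List (String × Int)) : Decidable (Spec_score_domains_py keywords domains out) := by unfold Spec_score_domains_py; infer_instance

-- ===== CLAIM (what is proved, stated in full; the proofs are below) =====
def Claim_equal_score_domains_py : Prop := ∀ (keywords : List String) (domains : List (String × List (String × List String))), Dom_score_domains_py keywords domains → Pre_score_domains_py keywords domains → Spec_score_domains_py keywords domains (score_domains_py keywords domains)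


-- ===== LEMMAS AND PROOFS =====

-- the per-domain score both programs compute, as a plain count
def sdScore (keywords : List String) (p : String × List (String × List String)) : Nat :=
  ((PySem.Set.ofList keywords).filter (fun k => decide (k ∈ sdVariants p))).length

-- the common reference output
def sdRef (keywords : List String) (domains : List (String × List (String × List String))) : List (String × Int) :=
  (domains.filter (fun p => decide (0 < sdScore keywords p))).map (fun p => (p.1, (sdScore keywords p : Int)))

-- A's `common` set is the text-keyword set filtered by membership in the variants list
theorem sd_common_eq (keywords : List String) (p : String × List (String × List String)) :
    PySem.Set.inter (PySem.Set.ofList keywords)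
      (PySem.Set.add (PySem.Set.add (PySem.Set.add
        (PySem.Set.ofList ((PySem.Dict.mk p.2).getD "keywords" [])) p.1)
        (PySem.Str.replace p.1 "_" "")) (PySem.Str.replace p.1 "_" " "))
    = (PySem.Set.ofList keywords).filter (fun k => decide (k ∈ sdVariants p)) := by
  unfold PySem.Set.inter
  apply List.filter_congr
  intro x _
  rw [Bool.eq_iff_iff]
  simp only [PySem.Set.contains_eq_listContains, List.contains_iff_mem, PySem.Set.mem_add,
    PySem.Set.mem_ofList, sdVariants, List.mem_append, List.mem_cons, List.not_mem_nil,
    or_false, decide_eq_true_eq]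
  tauto

-- ===== A side =====
theorem sdA_fold (keywords : List String) (ds : List (String × List (String × List String)))
    (d : PySem.Dict String Int)
    (hnd : (ds.map Prod.fst).Nodup) (hfresh : ∀ p ∈ ds, d.contains p.1 = false) :
    (ds.foldl (fun scores p =>
      if PySem.Set.inter (PySem.Set.ofList keywords)
          (PySem.Set.add (PySem.Set.add (PySem.Set.add
            (PySem.Set.ofList ((PySem.Dict.mk p.2).getD "keywords" [])) p.1)
            (PySem.Str.replace p.1 "_" "")) (PySem.Str.replace p.1 "_" " ")) ≠ []
      then scores.insert p.1 (PySem.Set.len (PySem.Set.inter (PySem.Set.ofList keywords)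
          (PySem.Set.add (PySem.Set.add (PySem.Set.add
            (PySem.Set.ofList ((PySem.Dict.mk p.2).getD "keywords" [])) p.1)
            (PySem.Str.replace p.1 "_" "")) (PySem.Str.replace p.1 "_" " "))))
      else scores) d).items
    = d.items ++ sdRef keywords ds := by
  induction ds generalizing d with
  | nil => simp [sdRef]
  | cons p tl ih =>
    simp only [List.map_cons, List.nodup_cons] at hnd
    have hfp := hfresh p (List.mem_cons_self ..)
    have hcommon := sd_common_eq keywords p
    have hlen : PySem.Set.len (PySem.Set.inter (PySem.Set.ofList keywords)
        (PySem.Set.add (PySem.Set.add (PySem.Set.add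
          (PySem.Set.ofList ((PySem.Dict.mk p.2).getD "keywords" [])) p.1)
          (PySem.Str.replace p.1 "_" "")) (PySem.Str.replace p.1 "_" " ")))
        = (sdScore keywords p : Int) := by
      rw [PySem.Set.len, hcommon, sdScore]
    simp only [List.foldl_cons]
    by_cases hpos : 0 < sdScore keywords p
    · have hne : PySem.Set.inter (PySem.Set.ofList keywords)
          (PySem.Set.add (PySem.Set.add (PySem.Set.add
            (PySem.Set.ofList ((PySem.Dict.mk p.2).getD "keywords" [])) p.1)
            (PySem.Str.replace p.1 "_" "")) (PySem.Str.replace p.1 "_" " ")) ≠ [] := by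
        rw [hcommon]
        intro h
        rw [sdScore, h] at hpos
        simp at hpos
      rw [if_pos hne, ih _ hnd.2]
      · rw [PySem.Dict.items_insert_of_not_contains _ _ hfp, hlen]
        simp [sdRef, hpos]
      · intro q hq
        rw [PySem.Dict.contains_insert]
        have hqp : q.1 ≠ p.1 := by
          intro h
          exact hnd.1 (h ▸ List.mem_map_of_mem hq)
        simp [hqp, hfresh q (List.mem_cons_of_mem _ hq)]
    · have heq : PySem.Set.inter (PySem.Set.ofList keywords)
          (PySem.Set.add (PySem.Set.add (PySem.Set.add
            (PySem.Set.ofList ((PySem.Dict.mk p.2).getD "keywords" [])) p.1)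
            (PySem.Str.replace p.1 "_" "")) (PySem.Str.replace p.1 "_" " ")) = [] := by
        rw [hcommon]
        rw [sdScore] at hpos
        exact List.length_eq_zero_iff.mp (by omega)
      rw [if_neg (by simp [heq]), ih _ hnd.2 (fun q hq => hfresh q (List.mem_cons_of_mem _ hq))]
      simp [sdRef, hpos]

theorem sdA_eq_ref (keywords : List String) (domains : List (String × List (String × List String)))
    (hnd : (domains.map Prod.fst).Nodup) :
    score_domains_py keywords domains = sdRef keywords domains := by
  have h := sdA_fold keywords domains PySem.Dict.empty hnd (fun p _ => rfl)
  simpa [score_domains_py, PySem.Dict.empty] using h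

-- ===== B side =====
-- one domain's inner index loop: it touches exactly the keywords in its variants list
theorem sd_idx_inner (ks : List String) (n : String) (idx : PySem.Dict String (PySem.Set String))
    (kw : String) :
    ((ks.foldl (fun idx k => idx.modify k [] (fun s => PySem.Set.add s n)) idx).getD kw [])
    = if kw ∈ ks then PySem.Set.add (idx.getD kw []) n else idx.getD kw [] := by
  induction ks using List.reverseRecOn with
  | nil => simp
  | append_singleton ks k ih =>
    rw [List.foldl_append, List.foldl_cons, List.foldl_nil, PySem.Dict.getD_modify]
    by_cases hk : kw = k
    · subst hk
      rw [if_pos rfl, if_pos (by simp), ih]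
      by_cases hm : kw ∈ ks
      · rw [if_pos hm, PySem.Set.add_of_mem ((PySem.Set.mem_add ..).mpr (Or.inr rfl))]
      · rw [if_neg hm]
    · rw [if_neg hk, ih]
      simp [List.mem_append, hk]

-- the inverted index at a keyword is the set of names of the domains whose variants hold it
theorem sd_idx (domains : List (String × List (String × List String))) (kw : String) :
    ((domains.foldl (fun idx p =>
        (sdVariants p).foldl (fun idx k =>
          idx.modify k [] (fun s => PySem.Set.add s p.1)) idx)
        PySem.Dict.empty).getD kw [])
    = PySem.Set.ofList ((domains.filter (fun p => decide (kw ∈ sdVariants p))).map Prod.fst) := by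
  induction domains using List.reverseRecOn with
  | nil => simp [PySem.Set.ofList]
  | append_singleton ds p ih =>
    rw [List.foldl_append, List.foldl_cons, List.foldl_nil, sd_idx_inner, ih,
      List.filter_append, List.map_append]
    by_cases hm : kw ∈ sdVariants p
    · rw [if_pos hm]
      simp [hm, PySem.Set.ofList_append_singleton]
    · rw [if_neg hm]
      simp [hm]

-- the scatter loop counts, per domain name, the votes it receives from each keyword's index entry
theorem sd_counts_getD (idx : PySem.Dict String (PySem.Set String)) (l : List String)
    (c : PySem.Dict String Int) (d : String) :
    ((l.foldl (fun c kw => ((idx.getD kw []).foldl (fun c x => c.modify x 0 (· + 1)) c)) c).getD d 0)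
    = c.getD d 0 + ((l.map (fun kw => ((List.count d (idx.getD kw [])) : Int))).sum) := by
  induction l generalizing c with
  | nil => simp
  | cons kw tl ih =>
    rw [List.foldl_cons, ih, PySem.Dict.getD_foldl_modify_add_one]
    simp [add_assoc]

-- a domain name is a key of the scatter dict iff some processed keyword's entry holds it
theorem sd_counts_mem (idx : PySem.Dict String (PySem.Set String)) (l : List String)
    (c : PySem.Dict String Int) (d : String) :
    (d ∈ (l.foldl (fun c kw => ((idx.getD kw []).foldl (fun c x => c.modify x 0 (· + 1)) c)) c).keys)
    ↔ d ∈ c.keys ∨ ∃ kw ∈ l, d ∈ idx.getD kw [] := by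
  induction l generalizing c with
  | nil => simp
  | cons kw tl ih =>
    rw [List.foldl_cons, ih,
      show (fun (c : PySem.Dict String Int) (x : String) => c.modify x 0 (· + 1))
        = (fun c x => c.modify x 0 ((fun (_ : PySem.Dict String Int) (_ : String) (v : Int) => v + 1) c x)) from rfl,
      PySem.Dict.keys_foldl_modify, PySem.Set.mem_update]
    constructor
    · rintro ((h | h) | ⟨k, hk, hd⟩)
      · exact Or.inl h
      · exact Or.inr ⟨kw, List.mem_cons_self .., h⟩
      · exact Or.inr ⟨k, List.mem_cons_of_mem _ hk, hd⟩
    · rintro (h | ⟨k, hk, hd⟩)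
      · exact Or.inl (Or.inl h)
      · rcases List.mem_cons.mp hk with rfl | hk
        · exact Or.inl (Or.inr hd)
        · exact Or.inr ⟨k, hk, hd⟩

-- with unique domain names, a name is in a keyword's index entry iff that domain's variants hold it
theorem sd_mem_matchers (domains : List (String × List (String × List String)))
    (hnd : (domains.map Prod.fst).Nodup) (p : String × List (String × List String))
    (hp : p ∈ domains) (kw : String) :
    p.1 ∈ (domains.filter (fun q => decide (kw ∈ sdVariants q))).map Prod.fst
    ↔ kw ∈ sdVariants p := by
  constructor
  · intro h
    obtain ⟨q, hq, hq1⟩ := List.mem_map.mp h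
    obtain ⟨hqd, hqv⟩ := List.mem_filter.mp hq
    have : q = p := List.inj_on_of_nodup_map hnd hqd hp hq1
    subst this
    exact of_decide_eq_true hqv
  · intro h
    exact List.mem_map_of_mem (List.mem_filter.mpr ⟨hp, decide_eq_true h⟩)

theorem sd_matchers_nodup (domains : List (String × List (String × List String)))
    (hnd : (domains.map Prod.fst).Nodup) (kw : String) :
    ((domains.filter (fun q => decide (kw ∈ sdVariants q))).map Prod.fst).Nodup :=
  List.Nodup.sublist (List.Sublist.map Prod.fst List.filter_sublist) hnd

theorem sdB_eq_ref (keywords : List String) (domains : List (String × List (String × List String)))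
    (hnd : (domains.map Prod.fst).Nodup) :
    score_domains_py_alt keywords domains = sdRef keywords domains := by
  unfold score_domains_py_alt
  rw [PySem.List.foldl_append_if (fun p => _) (fun p => _) domains []]
  rw [List.nil_append]
  have hget : ∀ p ∈ domains,
      (((PySem.Set.ofList keywords).foldl (fun c kw =>
        ((((domains.foldl (fun idx p =>
            (sdVariants p).foldl (fun idx k =>
              idx.modify k [] (fun s => PySem.Set.add s p.1)) idx)
            PySem.Dict.empty)).getD kw []).foldl (fun c d => c.modify d 0 (· + 1)) c))
        (PySem.Dict.empty : PySem.Dict String Int)).getD p.1 0) = (sdScore keywords p : Int) := by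
    intro p hp
    rw [sd_counts_getD]
    have hmap : ((PySem.Set.ofList keywords).map (fun kw =>
        ((List.count p.1 ((domains.foldl (fun idx p =>
            (sdVariants p).foldl (fun idx k =>
              idx.modify k [] (fun s => PySem.Set.add s p.1)) idx)
            PySem.Dict.empty).getD kw [])) : Int)))
        = ((PySem.Set.ofList keywords).map (fun kw =>
            if decide (kw ∈ sdVariants p) = true then (1 : Int) else 0)) := by
      apply List.map_congr_left
      intro kw _
      rw [sd_idx]
      rw [PySem.Set.ofList_eq_self_of_nodup _ (sd_matchers_nodup domains hnd kw)]
      rw [List.Nodup.count (sd_matchers_nodup domains hnd kw)]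
      by_cases hm : kw ∈ sdVariants p
      · rw [if_pos ((sd_mem_matchers domains hnd p hp kw).mpr hm), if_pos (by simp [hm])]
        norm_num
      · rw [if_neg (fun hc => hm ((sd_mem_matchers domains hnd p hp kw).mp hc)),
          if_neg (by simp [hm])]
        norm_num
    rw [hmap, PySem.List.sum_map_ite_one_zero, PySem.Dict.getD_empty,
      List.countP_eq_length_filter]
    simp [sdScore]
  have hcont : ∀ p ∈ domains,
      (((PySem.Set.ofList keywords).foldl (fun c kw =>
        ((((domains.foldl (fun idx p =>
            (sdVariants p).foldl (fun idx k =>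
              idx.modify k [] (fun s => PySem.Set.add s p.1)) idx)
            PySem.Dict.empty)).getD kw []).foldl (fun c d => c.modify d 0 (· + 1)) c))
        (PySem.Dict.empty : PySem.Dict String Int)).contains p.1) = decide (0 < sdScore keywords p) := by
    intro p hp
    rw [Bool.eq_iff_iff, PySem.Dict.contains_iff_mem_keys, sd_counts_mem, decide_eq_true_eq]
    have : ∀ kw, (p.1 ∈ (domains.foldl (fun idx p =>
            (sdVariants p).foldl (fun idx k =>
              idx.modify k [] (fun s => PySem.Set.add s p.1)) idx)
            PySem.Dict.empty).getD kw []) ↔ kw ∈ sdVariants p := by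
      intro kw
      rw [sd_idx, PySem.Set.mem_ofList]
      exact sd_mem_matchers domains hnd p hp kw
    simp only [PySem.Dict.keys_empty, List.not_mem_nil, false_or, this]
    rw [sdScore, ← List.countP_eq_length_filter, List.countP_pos_iff]
    simp
  rw [sdRef]
  rw [List.filter_congr hcont]
  apply List.map_congr_left
  intro p hp
  rw [hget p (List.mem_of_mem_filter hp)]

-- ===== VERDICT (by name: the statement is the Claim_ definition above) =====
theorem score_domains_py_spec : Claim_equal_score_domains_py := by
  intro keywords domains _ hpre
  unfold Spec_score_domains_py
  rw [sdA_eq_ref keywords domains hpre, sdB_eq_ref keywords domains hpre]
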